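-- pv_equiv track=rewrite | github.com/sw5e-foundry/sw5e-fvtt-import | utils/text.py | getStatblocks
-- ===== SOURCE A (Python) =====
-- def getStatblocks(text):
-- 	lines = text.split('\n')
-- 	text = ''
-- 	statblocks = []
--
-- 	statblock = ''
-- 	for line in lines:
-- 		if statblock == '':
-- 			if (text == '___\n' or text.endswith('\n___\n')) and line.startswith('>'):
-- 				statblock = '___\n' + line
-- 				text = text[:-4]
-- 		elif not line.startswith('>'):
-- 			statblocks += [statblock]
-- 			statblock = ''
--
-- 		if statblock == '':
-- 			text += line + '\n'
--
-- 	return text, statblocks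
-- ===== SOURCE B (Python) =====
-- def getStatblocks(text):
-- 	lines = text.split('\n')
-- 	out = []
-- 	statblocks = []
-- 	i = 0
-- 	n = len(lines)
-- 	while i < n:
-- 		line = lines[i]
-- 		if out and out[-1] == '___' and line.startswith('>'):
-- 			out.pop()
-- 			statblock = '___\n' + line
-- 			i += 1
-- 			while i < n and lines[i].startswith('>'):
-- 				i += 1
-- 			if i < n:
-- 				statblocks.append(statblock)
-- 			# the run's terminating line (if any) is re-processed by the outer loop
-- 		else:
-- 			out.append(line)
-- 			i += 1
-- 	return ''.join(l + '\n' for l in out), statblocks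
-- ===== Notes on version B (the rewrite author's own statement) =====
-- stated objective: alternative
-- what changed: Instead of A's fold that grows one text string and repeatedly probes its tail with endswith and re-slices it, B walks the lines with an index, keeps the kept lines in a list (popping the separator line when a statblock starts), skips each quote-line run with an explicit inner loop, and joins the kept lines once at the end.
import Mathlib
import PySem

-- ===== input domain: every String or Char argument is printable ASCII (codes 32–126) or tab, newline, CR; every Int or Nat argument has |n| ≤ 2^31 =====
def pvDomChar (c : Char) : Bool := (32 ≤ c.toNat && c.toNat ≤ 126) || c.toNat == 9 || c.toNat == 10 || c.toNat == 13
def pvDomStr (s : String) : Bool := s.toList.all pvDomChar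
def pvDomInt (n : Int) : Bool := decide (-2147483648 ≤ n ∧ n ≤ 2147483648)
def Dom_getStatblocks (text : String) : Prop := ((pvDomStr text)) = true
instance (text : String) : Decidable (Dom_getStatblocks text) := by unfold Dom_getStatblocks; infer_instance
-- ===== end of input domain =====

-- B re-implements A by a different decomposition: a walk over the lines keeping a list of kept
-- lines (joined once at the end) with an explicit inner skip over each '>' run, instead of A's
-- single fold whose growing text string is repeatedly probed with endswith and re-sliced.

-- ===== PORT A =====
-- one iteration of A's for-loop; state = (text, statblocks, statblock), strings as List Char
def aStep (st : List Char × List (List Char) × List Char) (line : List Char) :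
    List Char × List (List Char) × List Char :=
  let (text, statblocks, statblock) := st
  let (text, statblocks, statblock) :=
    if statblock == ([] : List Char) then
      if ((text == "___\n".toList) || PySem.Chars.endswith text "\n___\n".toList)
          && PySem.Chars.startswith line ['>'] then
        (PySem.Chars.slice text none (some (-4)), statblocks, "___\n".toList ++ line)
      else (text, statblocks, statblock)
    else if !(PySem.Chars.startswith line ['>']) then
      (text, statblocks ++ [statblock], ([] : List Char))
    else (text, statblocks, statblock)
  if statblock == ([] : List Char) then (text ++ line ++ ['\n'], statblocks, statblock)
  else (text, statblocks, statblock)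

def getStatblocks (text : String) : String × List String :=
  let lines := PySem.Chars.splitOn text.toList ['\n']
  let st := lines.foldl aStep ([], [], [])
  (String.ofList st.1, st.2.1.map String.ofList)

-- ===== PORT B =====
-- outer while-loop of B: `out` collects kept lines; a kept '___' followed by a '>' line pops
-- the '___', skips the maximal '>' run (the dropWhile is B's inner while-loop), and the block
-- is recorded only if a real line terminated the run (that line re-enters the outer loop).
def altLoop (lines out sbs : List (List Char)) : List (List Char) × List (List Char) :=
  match lines with
  | [] => (out, sbs)
  | line :: rest =>
    if (out.getLast? == some ['_', '_', '_']) && PySem.Chars.startswith line ['>'] then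
      match _h : rest.dropWhile (fun l => PySem.Chars.startswith l ['>']) with
      | [] => (out.dropLast, sbs)
      | l :: ls => altLoop (l :: ls) out.dropLast (sbs ++ ["___\n".toList ++ line])
    else altLoop rest (out ++ [line]) sbs
termination_by lines.length
decreasing_by
  · have h1 := List.length_dropWhile_le (fun l => PySem.Chars.startswith l ['>']) rest
    rw [_h] at h1
    simpa using Nat.lt_succ_of_le h1
  · simp

def getStatblocks_alt (text : String) : String × List String :=
  let lines := PySem.Chars.splitOn text.toList ['\n']
  let (out, sbs) := altLoop lines [] []
  (String.ofList (PySem.Chars.join [] (out.map (fun l => l ++ ['\n']))), sbs.map String.ofList)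

-- ===== PRECONDITION & SPEC =====
def Spec_getStatblocks (text : String) (out : String × List String) : Prop := out = getStatblocks_alt text
instance (text : String) (out : String × List String) : Decidable (Spec_getStatblocks text out) := by unfold Spec_getStatblocks; infer_instance

-- ===== CLAIM (what is proved, stated in full; the proofs are below) =====
def Claim_equal_getStatblocks : Prop := ∀ (text : String), Dom_getStatblocks text → Spec_getStatblocks text (getStatblocks text)

-- ===== LEMMAS AND PROOFS =====

-- B's reconstructed text: every kept line contributes itself plus '\n'
def pvJ (out : List (List Char)) : List Char :=
  PySem.Chars.join [] (out.map (fun l => l ++ ['\n']))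

theorem pvJ_eq_flatten (out : List (List Char)) :
    pvJ out = (out.map (fun l => l ++ ['\n'])).flatten := by
  unfold pvJ
  induction out with
  | nil => simp [PySem.Chars.join_nil]
  | cons a t ih =>
    cases t with
    | nil => simp [PySem.Chars.join_singleton]
    | cons b t' => simp_all [PySem.Chars.join_cons_cons]

theorem pvJ_append (out : List (List Char)) (l : List Char) :
    pvJ (out ++ [l]) = pvJ out ++ l ++ ['\n'] := by
  simp [pvJ_eq_flatten]

theorem pvJ_ends_nl (out : List (List Char)) (h : out ≠ []) :
    ∃ t, pvJ out = t ++ ['\n'] := by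
  obtain ⟨ys, y, rfl⟩ := (List.eq_nil_or_concat out).resolve_left h
  exact ⟨pvJ ys ++ y, by simpa using pvJ_append ys y⟩

-- A's "text ends in a bare '___' line" test equals B's "last kept line is '___'" test
theorem condA_eq (out : List (List Char)) (h : ∀ l ∈ out, ('\n' : Char) ∉ l) :
    ((pvJ out == "___\n".toList) || PySem.Chars.endswith (pvJ out) "\n___\n".toList)
      = (out.getLast? == some ['_', '_', '_']) := by
  rcases List.eq_nil_or_concat out with rfl | ⟨init, last, rfl⟩
  · decide
  · rw [List.concat_eq_append] at *
    have hnl : ('\n' : Char) ∉ last := h last (by simp)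
    rw [pvJ_append]
    by_cases hlast : last = ['_', '_', '_']
    · subst hlast
      rcases eq_or_ne init [] with rfl | hne
      · simp only [List.getLast?_concat, beq_self_eq_true, Bool.or_eq_true]
        left
        rw [beq_iff_eq]
        decide
      · obtain ⟨t, ht⟩ := pvJ_ends_nl init hne
        have hends :
            PySem.Chars.endswith (pvJ init ++ ['_', '_', '_'] ++ ['\n']) "\n___\n".toList = true := by
          rw [PySem.Chars.endswith_iff, ht]
          exact ⟨t, by simp⟩
        simp only [List.getLast?_concat, beq_self_eq_true, Bool.or_eq_true]
        right
        simpa using hends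
    · have hR : ((init ++ [last]).getLast? == some ['_', '_', '_']) = false := by
        simp [hlast]
      rw [hR]
      have hq : init = [] ∧ (pvJ init).reverse = [] ∨ ∃ t', (pvJ init).reverse = '\n' :: t' := by
        rcases eq_or_ne init [] with rfl | hne
        · left; exact ⟨rfl, by decide⟩
        · obtain ⟨t, ht⟩ := pvJ_ends_nl init hne
          right; exact ⟨t.reverse, by simp [ht]⟩
      have ha : (pvJ init ++ last ++ ['\n'] == "___\n".toList) = false := by
        rw [beq_eq_false_iff_ne]
        intro he
        have hrev : '\n' :: (last.reverse ++ (pvJ init).reverse) = ['\n', '_', '_', '_'] := by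
          have := congrArg List.reverse he
          simpa using this
        have h3 : last.reverse ++ (pvJ init).reverse = ['_', '_', '_'] := by
          simpa using hrev
        rcases hq with ⟨hinit, hq0⟩ | ⟨t', ht'⟩
        · rw [hq0, List.append_nil] at h3
          exact hlast (by simpa using congrArg List.reverse h3)
        · have hmem : ('\n' : Char) ∈ last.reverse ++ (pvJ init).reverse := by
            rw [ht']; simp
          rw [h3] at hmem; simp at hmem
      have hb : PySem.Chars.endswith (pvJ init ++ last ++ ['\n']) "\n___\n".toList = false := by
        rw [Bool.eq_false_iff, Ne, PySem.Chars.endswith_iff]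
        intro hs
        have hpre := List.reverse_prefix.mpr hs
        have hpre2 : ['\n', '_', '_', '_', '\n'] <+: '\n' :: (last.reverse ++ (pvJ init).reverse) := by
          simpa using hpre
        rw [List.cons_prefix_cons] at hpre2
        have hpre3 : ['_', '_', '_', '\n'] <+: last.reverse ++ (pvJ init).reverse := hpre2.2
        have hnlr : ('\n' : Char) ∉ last.reverse := by simpa using hnl
        rcases hq with ⟨hinit, hq0⟩ | ⟨t', ht'⟩
        · rw [hq0, List.append_nil] at hpre3
          exact hnlr (hpre3.subset (by simp))
        · rw [ht'] at hpre3
          rcases hlr : last.reverse with _ | ⟨a, _ | ⟨b, _ | ⟨c, _ | ⟨d, tl⟩⟩⟩⟩ <;> rw [hlr] at hpre3 hnlr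
          · simp [List.cons_prefix_cons] at hpre3
          · simp [List.cons_prefix_cons] at hpre3
          · simp [List.cons_prefix_cons] at hpre3
          · simp only [List.cons_append, List.nil_append] at hpre3
            rw [List.cons_prefix_cons, List.cons_prefix_cons, List.cons_prefix_cons] at hpre3
            obtain ⟨ha1, hb1, hc1, -⟩ := hpre3
            apply hlast
            have hrv : last.reverse = ['_', '_', '_'] := by rw [hlr, ← ha1, ← hb1, ← hc1]
            simpa using congrArg List.reverse hrv
          · simp only [List.cons_append] at hpre3
            rw [List.cons_prefix_cons, List.cons_prefix_cons, List.cons_prefix_cons,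
              List.cons_prefix_cons] at hpre3
            obtain ⟨-, -, -, hd1, -⟩ := hpre3
            exact hnlr (by rw [← hd1]; simp)
      rw [ha, hb]
      rfl

theorem slice_concat4 (xs : List Char) (a b c d : Char) :
    PySem.List.slice (xs ++ [a, b, c, d]) none (some (-4)) = xs := by
  unfold PySem.List.slice
  simp

-- text[:-4] after a bare '___' line = dropping that line from the kept list
theorem sliceA_eq (out : List (List Char)) (h : out.getLast? = some ['_', '_', '_']) :
    PySem.List.slice (pvJ out) none (some (-4)) = pvJ out.dropLast := by
  obtain ⟨ys, rfl⟩ := List.getLast?_eq_some_iff.mp h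
  rw [pvJ_append, List.dropLast_concat]
  have hxs : pvJ ys ++ ['_', '_', '_'] ++ ['\n'] = pvJ ys ++ ['_', '_', '_', '\n'] := by simp
  rw [hxs, slice_concat4]

-- A's loop while statblock ≠ '': skip the '>' run, then flush the block on the first real line
theorem skip_fold (rest : List (List Char)) (t : List Char) (s : List (List Char))
    (sb : List Char) (hsb : sb ≠ []) :
    rest.foldl aStep (t, s, sb) =
      match rest.dropWhile (fun l => PySem.Chars.startswith l ['>']) with
      | [] => (t, s, sb)
      | L :: rest2 => rest2.foldl aStep (t ++ L ++ ['\n'], s ++ [sb], ([] : List Char)) := by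
  have hb : (sb == ([] : List Char)) = false := by simpa [beq_eq_false_iff_ne] using hsb
  induction rest with
  | nil => simp [List.dropWhile_nil]
  | cons L rest' ih =>
    by_cases hL : PySem.Chars.startswith L ['>'] = true
    · have hstep : aStep (t, s, sb) L = (t, s, sb) := by
        simp [aStep, hb, hL]
      simp only [List.foldl_cons, hstep, List.dropWhile_cons, hL, if_pos]
      exact ih
    · have hL' : PySem.Chars.startswith L ['>'] = false := by simpa using hL
      have hstep : aStep (t, s, sb) L = (t ++ L ++ ['\n'], s ++ [sb], ([] : List Char)) := by
        simp [aStep, hb, hL']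
      simp [List.foldl_cons, hstep, hL']

theorem splitOn_go_no_nl (fuel : Nat) :
    ∀ (l cur : List Char) (acc : List (List Char)), l.length ≤ fuel →
      (∀ p ∈ acc, ('\n' : Char) ∉ p) → ('\n' : Char) ∉ cur →
      ∀ p ∈ PySem.Chars.splitOn.go ['\n'] fuel l cur acc, ('\n' : Char) ∉ p := by
  induction fuel with
  | zero =>
    intro l cur acc hl hacc hcur
    have hl0 : l = [] := List.eq_nil_of_length_eq_zero (Nat.le_zero.mp hl)
    subst hl0
    intro p hp
    rw [PySem.Chars.splitOn.go] at hp
    simp at hp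
    rcases hp with hp | rfl
    · exact hacc p hp
    · simpa using hcur
  | succ fuel ih =>
    intro l cur acc hl hacc hcur
    match l with
    | [] =>
      intro p hp
      rw [PySem.Chars.splitOn.go] at hp
      · simp at hp
        rcases hp with hp | rfl
        · exact hacc p hp
        · simpa using hcur
      · omega
    | c :: rest =>
      intro p hp
      rw [PySem.Chars.splitOn.go] at hp
      by_cases hc : c = '\n'
      · subst hc
        have hpref : (['\n'] : List Char).isPrefixOf ('\n' :: rest) = true := by
          simp [List.isPrefixOf]
        simp only [hpref, if_true] at hp
        refine ih (List.drop 1 ('\n' :: rest)) [] (cur.reverse :: acc)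
          (by simpa using Nat.le_of_succ_le_succ (by simpa using hl)) ?_ (by simp) p hp
        intro q hq
        rcases List.mem_cons.mp hq with rfl | hq
        · simpa using hcur
        · exact hacc q hq
      · have hpref : (['\n'] : List Char).isPrefixOf (c :: rest) = false := by
          simp [List.isPrefixOf]
          intro hh
          exact (hc hh.symm).elim
        simp only [hpref, Bool.false_eq_true, if_false] at hp
        refine ih rest (c :: cur) acc (by simpa using hl) hacc ?_ p hp
        intro hmem
        rcases List.mem_cons.mp hmem with rfl | hmem
        · exact hc rfl
        · exact hcur hmem

theorem splitOn_no_nl (cs : List Char) :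
    ∀ l ∈ PySem.Chars.splitOn cs ['\n'], ('\n' : Char) ∉ l := by
  intro l hl
  exact splitOn_go_no_nl (cs.length + 1) cs [] [] (by omega) (by simp) (by simp) l hl

-- the two loops agree: A's fold state (text, statblocks, '') tracks B's (out, statblocks)
theorem main_loop (n : Nat) (lines out sbs : List (List Char))
    (hn : lines.length ≤ n)
    (hlines : ∀ l ∈ lines, ('\n' : Char) ∉ l)
    (hout : ∀ l ∈ out, ('\n' : Char) ∉ l) :
    (lines.foldl aStep (pvJ out, sbs, [])).1 = pvJ (altLoop lines out sbs).1 ∧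
    (lines.foldl aStep (pvJ out, sbs, [])).2.1 = (altLoop lines out sbs).2 := by
  induction n generalizing lines out sbs with
  | zero =>
    have hl0 : lines = [] := List.eq_nil_of_length_eq_zero (Nat.le_zero.mp hn)
    subst hl0
    rw [altLoop]
    exact ⟨rfl, rfl⟩
  | succ n ih =>
    cases lines with
    | nil =>
      rw [altLoop]
      exact ⟨rfl, rfl⟩
    | cons line rest =>
      have hline : ('\n' : Char) ∉ line := hlines line (by simp)
      have hrestln : ∀ l ∈ rest, ('\n' : Char) ∉ l := fun l hl => hlines l (by simp [hl])
      by_cases hC : ((out.getLast? == some ['_', '_', '_'])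
          && PySem.Chars.startswith line ['>']) = true
      · obtain ⟨hgl', hsw⟩ := Bool.and_eq_true_iff.mp hC
        have hgl : out.getLast? = some ['_', '_', '_'] := by simpa using hgl'
        have e1 : aStep (pvJ out, sbs, ([] : List Char)) line
            = (pvJ out.dropLast, sbs, "___\n".toList ++ line) := by
          simp only [aStep]
          rw [condA_eq out hout]
          simp [hC, sliceA_eq out hgl]
        cases hdrop : rest.dropWhile (fun l => PySem.Chars.startswith l ['>']) with
        | nil =>
          rw [List.foldl_cons, e1,
            skip_fold rest (pvJ out.dropLast) sbs ("___\n".toList ++ line) (by simp), hdrop]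
          rw [altLoop]
          simp only [hC, if_true]
          split
          · exact ⟨rfl, rfl⟩
          · rename_i heq
            rw [hdrop] at heq
            cases heq
        | cons L rest2 =>
          have hswL : PySem.Chars.startswith L ['>'] = false := by
            have hne2 : rest.dropWhile (fun l => PySem.Chars.startswith l ['>']) ≠ [] := by
              rw [hdrop]; simp
            have h2 := List.head_dropWhile_not (fun l => PySem.Chars.startswith l ['>']) hne2
            have h4 : (rest.dropWhile (fun l => PySem.Chars.startswith l ['>'])).head? = some L := by
              rw [hdrop]; rfl
            rw [List.head?_eq_some_head hne2] at h4
            rw [Option.some_inj.mp h4] at h2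
            exact h2
          have hsubrest : ∀ l ∈ L :: rest2, l ∈ rest := by
            intro l hl
            have : l ∈ rest.dropWhile (fun l => PySem.Chars.startswith l ['>']) := by
              rw [hdrop]; exact hl
            exact (List.dropWhile_sublist _).subset this
          have hlen2 : (L :: rest2).length ≤ rest.length := by
            have := List.length_dropWhile_le (fun l => PySem.Chars.startswith l ['>']) rest
            rw [hdrop] at this
            exact this
          rw [List.foldl_cons, e1,
            skip_fold rest (pvJ out.dropLast) sbs ("___\n".toList ++ line) (by simp), hdrop]
          rw [altLoop]
          simp only [hC, if_true]
          split
          · rename_i heq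
            rw [hdrop] at heq
            cases heq
          · rename_i l ls heq
            rw [hdrop] at heq
            obtain ⟨rfl, rfl⟩ : L = l ∧ rest2 = ls := by
              cases heq; exact ⟨rfl, rfl⟩
            rw [altLoop]
            have hcond2 : ((out.dropLast.getLast? == some ['_', '_', '_'])
                && PySem.Chars.startswith L ['>']) = false := by
              simp [hswL]
            simp only [hcond2, Bool.false_eq_true, if_false]
            have htxt : pvJ out.dropLast ++ L ++ ['\n'] = pvJ (out.dropLast ++ [L]) := by
              rw [pvJ_append]
            rw [htxt]
            refine ih rest2 (out.dropLast ++ [L]) (sbs ++ ["___\n".toList ++ line]) ?_ ?_ ?_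
            · simp only [List.length_cons] at hlen2
              simp only [List.length_cons] at hn
              omega
            · intro l hl
              exact hrestln l (hsubrest l (by simp [hl]))
            · intro l hl
              rcases List.mem_append.mp hl with hl | hl
              · exact hout l (List.dropLast_subset out hl)
              · rw [List.mem_singleton.mp hl]
                exact hrestln L (hsubrest L (by simp))
      · have hC' : ((out.getLast? == some ['_', '_', '_'])
            && PySem.Chars.startswith line ['>']) = false := by simpa using hC
        have e2 : aStep (pvJ out, sbs, ([] : List Char)) line
            = (pvJ (out ++ [line]), sbs, ([] : List Char)) := by
          simp only [aStep]
          rw [condA_eq out hout]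
          simp [hC', pvJ_append]
        rw [List.foldl_cons, e2, altLoop]
        simp only [hC', Bool.false_eq_true, if_false]
        refine ih rest (out ++ [line]) sbs ?_ hrestln ?_
        · simp only [List.length_cons] at hn
          omega
        · intro l hl
          rcases List.mem_append.mp hl with hl | hl
          · exact hout l hl
          · rw [List.mem_singleton.mp hl]
            exact hline

-- ===== VERDICT (by name: the statement is the Claim_ definition above) =====
theorem getStatblocks_spec : Claim_equal_getStatblocks := by
  unfold Claim_equal_getStatblocks Spec_getStatblocks
  intro text _
  unfold getStatblocks getStatblocks_alt
  have h0 : pvJ [] = [] := by decide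
  have h := main_loop (PySem.Chars.splitOn text.toList ['\n']).length
    (PySem.Chars.splitOn text.toList ['\n']) [] [] le_rfl (splitOn_no_nl text.toList) (by simp)
  rw [h0] at h
  obtain ⟨h1, h2⟩ := h
  unfold pvJ at h1
  simp only [h1, h2]
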